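-- pv_equiv track=rewrite | github.com/MaxPep001011/freq | fcrypto.py | extract_signed_text
-- ===== SOURCE A (Python) =====
-- def extract_signed_text(clearsigned: str) -> str:
--     """ Extracts cleartext from signed text (for messages) """
--     lines = clearsigned.splitlines()
--     extracted = []
--     capture = False
--     for line in lines:
--         if line.startswith("-----BEGIN PGP SIGNATURE-----"):
--             break
--         if capture:
--             extracted.append(line)
--         if line.startswith("Hash:"):
--             capture = True
--     return "\n".join(extracted).strip()
-- ===== SOURCE B (Python) =====
-- def extract_signed_text(clearsigned: str) -> str:
--     """ Extracts cleartext from signed text (for messages) """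
--     lines = clearsigned.splitlines()
--     end = next((i for i, l in enumerate(lines)
--                 if l.startswith("-----BEGIN PGP SIGNATURE-----")), len(lines))
--     h = next((i for i in range(end) if lines[i].startswith("Hash:")), None)
--     if h is None:
--         return ""
--     return "\n".join(lines[h + 1:end]).strip()
-- ===== Notes on version B (the rewrite author's own statement) =====
-- stated objective: alternative
-- what changed: Replaces the single stateful scan with a capture flag by a boundary computation: find the signature-marker index and the first Hash-line index before it, then join the slice between them.
import Mathlib
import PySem

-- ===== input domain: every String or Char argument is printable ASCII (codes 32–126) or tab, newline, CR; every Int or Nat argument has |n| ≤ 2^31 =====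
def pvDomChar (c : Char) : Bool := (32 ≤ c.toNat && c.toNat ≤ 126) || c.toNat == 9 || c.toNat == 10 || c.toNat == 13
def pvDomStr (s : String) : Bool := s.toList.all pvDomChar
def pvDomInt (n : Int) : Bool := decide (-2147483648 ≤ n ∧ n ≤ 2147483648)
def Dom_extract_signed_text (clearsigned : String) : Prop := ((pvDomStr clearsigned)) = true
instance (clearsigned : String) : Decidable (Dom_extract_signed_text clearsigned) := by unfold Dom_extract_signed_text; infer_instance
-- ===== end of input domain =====

-- B replaces A's single stateful scan (capture flag) by a boundary computation:
-- index of the signature marker, then index of the first Hash line before it, then one slice-and-join.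
-- Objective: alternative decomposition, same cost.


-- ===== PORT A =====
-- the for-loop with its (extracted, capture) state and the break on the signature marker
def extract_signed_text_go : List String → List String → Bool → List String
  | [], extracted, _ => extracted
  | line :: rest, extracted, capture =>
    if PySem.Str.startswith line "-----BEGIN PGP SIGNATURE-----" then extracted
    else
      extract_signed_text_go rest
        (if capture then extracted ++ [line] else extracted)
        (if PySem.Str.startswith line "Hash:" then true else capture)

def extract_signed_text (clearsigned : String) : String :=
  PySem.Str.strip
    (PySem.Str.join "\n" (extract_signed_text_go (PySem.Str.splitlines clearsigned) [] false))

-- ===== PORT B =====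
def extract_signed_text_alt (clearsigned : String) : String :=
  let lines := PySem.Str.splitlines clearsigned
  -- end = next((i for i, l in enumerate(lines) if l.startswith(sig marker)), len(lines))
  let e := lines.findIdx (fun l => PySem.Str.startswith l "-----BEGIN PGP SIGNATURE-----")
  -- h = next((i for i in range(end) if lines[i].startswith("Hash:")), None)
  match (lines.take e).findIdx? (fun l => PySem.Str.startswith l "Hash:") with
  | none => ""
  | some h => PySem.Str.strip (PySem.Str.join "\n" ((lines.take e).drop (h + 1)))

-- ===== PRECONDITION & SPEC =====
def Spec_extract_signed_text (clearsigned : String) (out : String) : Prop := out = extract_signed_text_alt clearsigned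
instance (clearsigned : String) (out : String) : Decidable (Spec_extract_signed_text clearsigned out) := by unfold Spec_extract_signed_text; infer_instance

-- ===== CLAIM (what is proved, stated in full; the proofs are below) =====
def Claim_equal_extract_signed_text : Prop := ∀ (clearsigned : String), Dom_extract_signed_text clearsigned → Spec_extract_signed_text clearsigned (extract_signed_text clearsigned)

-- ===== LEMMAS AND PROOFS =====

-- take at the first index satisfying p is takeWhile of the negation
theorem take_findIdx_eq_takeWhile (p : String → Bool) (ls : List String) :
    ls.take (ls.findIdx p) = ls.takeWhile (fun l => !p l) := by
  induction ls with
  | nil => rfl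
  | cons a t ih =>
    rw [List.findIdx_cons, List.takeWhile_cons]
    by_cases h : p a = true
    · rw [h, cond_true, Bool.not_true, if_neg Bool.false_ne_true, List.take_zero]
    · rw [Bool.not_eq_true] at h
      rw [h, cond_false, Bool.not_false, if_pos rfl, List.take_succ_cons, ih]

-- with capture already set, A's loop appends every line up to the signature marker
theorem go_true (ls acc) :
    extract_signed_text_go ls acc true
      = acc ++ ls.takeWhile (fun l => !PySem.Str.startswith l "-----BEGIN PGP SIGNATURE-----") := by
  induction ls generalizing acc with
  | nil => rw [List.takeWhile_nil, List.append_nil]; rfl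
  | cons a t ih =>
    rw [extract_signed_text_go, List.takeWhile_cons]
    by_cases hs : PySem.Str.startswith a "-----BEGIN PGP SIGNATURE-----" = true
    · rw [hs, Bool.not_true, if_pos rfl, if_neg Bool.false_ne_true, List.append_nil]
    · rw [Bool.not_eq_true] at hs
      rw [hs, Bool.not_false, if_neg Bool.false_ne_true, if_pos rfl, ite_self,
        ih, List.append_assoc, List.singleton_append, if_pos rfl]

-- with capture unset, A's loop computes exactly B's Hash-index slice
theorem go_false (ls acc) :
    extract_signed_text_go ls acc false
      = acc ++ (match ((ls.takeWhile (fun l => !PySem.Str.startswith l "-----BEGIN PGP SIGNATURE-----")).findIdx?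
                  (fun l => PySem.Str.startswith l "Hash:")) with
          | none => []
          | some h => (ls.takeWhile (fun l => !PySem.Str.startswith l "-----BEGIN PGP SIGNATURE-----")).drop (h + 1)) := by
  induction ls generalizing acc with
  | nil =>
    rw [List.takeWhile_nil, List.findIdx?_nil]
    exact (List.append_nil acc).symm
  | cons a t ih =>
    rw [extract_signed_text_go, List.takeWhile_cons]
    by_cases hs : PySem.Str.startswith a "-----BEGIN PGP SIGNATURE-----" = true
    · rw [hs, Bool.not_true, if_pos rfl, if_neg Bool.false_ne_true, List.findIdx?_nil]
      exact (List.append_nil acc).symm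
    · rw [Bool.not_eq_true] at hs
      rw [hs, Bool.not_false, if_neg Bool.false_ne_true, if_pos rfl, List.findIdx?_cons]
      by_cases hh : PySem.Str.startswith a "Hash:" = true
      · rw [hh, if_pos rfl, if_pos rfl, go_true]
        rfl
      · rw [Bool.not_eq_true] at hh
        rw [hh, if_neg Bool.false_ne_true, if_neg Bool.false_ne_true, ih]
        cases hfi : ((t.takeWhile (fun l => !PySem.Str.startswith l "-----BEGIN PGP SIGNATURE-----")).findIdx?
            (fun l => PySem.Str.startswith l "Hash:")) with
        | none => rfl
        | some h => rfl

-- ===== VERDICT (by name: the statement is the Claim_ definition above) =====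
theorem extract_signed_text_spec : Claim_equal_extract_signed_text := by
  intro s _
  unfold Spec_extract_signed_text
  have halt : extract_signed_text_alt s
      = (match (((PySem.Str.splitlines s).take
              ((PySem.Str.splitlines s).findIdx
                (fun l => PySem.Str.startswith l "-----BEGIN PGP SIGNATURE-----"))).findIdx?
              (fun l => PySem.Str.startswith l "Hash:")) with
        | none => ""
        | some h => PySem.Str.strip (PySem.Str.join "\n"
            (((PySem.Str.splitlines s).take
              ((PySem.Str.splitlines s).findIdx
                (fun l => PySem.Str.startswith l "-----BEGIN PGP SIGNATURE-----"))).drop (h + 1)))) := rfl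
  rw [halt, take_findIdx_eq_takeWhile]
  unfold extract_signed_text
  rw [go_false, List.nil_append]
  cases hfi : (((PySem.Str.splitlines s).takeWhile
      (fun l => !PySem.Str.startswith l "-----BEGIN PGP SIGNATURE-----")).findIdx?
      (fun l => PySem.Str.startswith l "Hash:")) with
  | none => rfl
  | some h => rfl
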